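-- pv_equiv track=rewrite | github.com/bysmaks/OzonCTF-2025 | ppc/palindrome_master/deploy/server.py | is_sublist
-- ===== SOURCE A (Python) =====
-- def is_sublist(words, response):
--     words = sorted(words)
--     response = sorted(response)
--
--     len_response = len(response)
--     if len_response == 0:
--         return True
--     if len_response > len(words):
--         return False
--
--     response_tuple = tuple(response)
--
--     for i in range(len(words) - len_response + 1):
--         if tuple(words[i:i+len_response]) == response_tuple:
--             return True
--     return False
-- ===== SOURCE B (Python) =====
-- def is_sublist(words, response):
--     # Sorted response can only match at ONE position in sorted words:
--     # just after the elements <= response's minimum, minus the run of copies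
--     # of that minimum inside response. Check that single candidate slice.
--     w = sorted(words)
--     r = sorted(response)
--     m = len(r)
--     if m == 0:
--         return True
--     first = r[0]
--     run = 0
--     for x in r:
--         if x == first:
--             run += 1
--         else:
--             break
--     le = 0
--     for x in w:
--         if x <= first:
--             le += 1
--         else:
--             break
--     i = le - run
--     return i >= 0 and w[i:i + m] == r
-- ===== Notes on version B (the rewrite author's own statement) =====
-- stated objective: alternative
-- what changed: Replaces A's sliding-window scan (building and comparing an m-tuple at every start index of sorted words) by a single candidate-position check: since both lists are sorted, a match can only start at (count of words <= min(response)) minus (run of min(response) copies in response), so B compares one slice.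
import Mathlib
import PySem

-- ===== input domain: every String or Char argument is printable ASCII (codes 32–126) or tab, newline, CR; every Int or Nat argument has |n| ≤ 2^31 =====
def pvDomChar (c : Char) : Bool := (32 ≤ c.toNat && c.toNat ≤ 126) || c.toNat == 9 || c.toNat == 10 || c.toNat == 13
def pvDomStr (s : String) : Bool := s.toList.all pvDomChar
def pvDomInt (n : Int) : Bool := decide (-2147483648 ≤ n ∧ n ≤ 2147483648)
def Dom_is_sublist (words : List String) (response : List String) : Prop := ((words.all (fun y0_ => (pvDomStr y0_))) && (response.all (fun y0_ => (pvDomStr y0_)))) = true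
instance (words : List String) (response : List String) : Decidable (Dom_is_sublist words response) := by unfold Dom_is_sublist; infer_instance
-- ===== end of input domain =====

-- B replaces A's sliding-window scan over sorted words by a single candidate-position
-- check derived from sortedness (objective: alternative algorithm, same overall cost).


-- ===== PORT A =====
def is_sublist (words : List String) (response : List String) : Bool :=
  let w := PySem.List.sorted words (fun s => s) false
  let r := PySem.List.sorted response (fun s => s) false
  let len_response : Int := (r.length : Int)
  if len_response = 0 then true
  else if len_response > (w.length : Int) then false
  else
    -- 'for i in range(...): if tuple(words[i:i+len_response]) == response_tuple: return True' / final 'return False'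
    (PySem.List.pyRange 0 ((w.length : Int) - len_response + 1) 1).any
      (fun i => PySem.List.slice w (some i) (some (i + len_response)) == r)

-- ===== PORT B =====
-- B's two 'for … break' counting loops: length of the longest prefix satisfying p
def pvPrefixCount (p : String → Bool) : List String → Nat
  | [] => 0
  | x :: xs => if p x then pvPrefixCount p xs + 1 else 0

def is_sublist_alt (words : List String) (response : List String) : Bool :=
  let w := PySem.List.sorted words (fun s => s) false
  let r := PySem.List.sorted response (fun s => s) false
  let m := r.length
  if m = 0 then true
  else
    let first := r.headI          -- r[0]; r ≠ [] in this branch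
    let run := pvPrefixCount (fun x => x == first) r
    let le := pvPrefixCount (fun x => decide (x ≤ first)) w
    let i : Int := (le : Int) - (run : Int)
    decide (0 ≤ i) && (PySem.List.slice w (some i) (some (i + (m : Int))) == r)

-- ===== PRECONDITION & SPEC =====
def Spec_is_sublist (words : List String) (response : List String) (out : Bool) : Prop := out = is_sublist_alt words response
instance (words : List String) (response : List String) (out : Bool) : Decidable (Spec_is_sublist words response out) := by unfold Spec_is_sublist; infer_instance

-- ===== CLAIM (what is proved, stated in full; the proofs are below) =====
def Claim_equal_is_sublist : Prop := ∀ (words : List String) (response : List String), Dom_is_sublist words response → Spec_is_sublist words response (is_sublist words response)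

-- ===== LEMMAS AND PROOFS =====

theorem pvPrefixCount_cons_true (p : String → Bool) (x : String) (xs : List String)
    (h : p x = true) : pvPrefixCount p (x :: xs) = pvPrefixCount p xs + 1 := by
  simp [pvPrefixCount, h]

theorem pvPrefixCount_cons_false (p : String → Bool) (x : String) (xs : List String)
    (h : p x = false) : pvPrefixCount p (x :: xs) = 0 := by
  simp [pvPrefixCount, h]

theorem pvPrefixCount_le_length (p : String → Bool) (l : List String) :
    pvPrefixCount p l ≤ l.length := by
  induction l with
  | nil => simp [pvPrefixCount]
  | cons x xs ih =>
    rcases Bool.eq_false_or_eq_true (p x) with hpx | hpx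
    · rw [pvPrefixCount_cons_true p x xs hpx]; simp; omega
    · rw [pvPrefixCount_cons_false p x xs hpx]; omega

theorem pvPrefixCount_getElem_true (p : String → Bool) (l : List String) (k : Nat)
    (hk : k < l.length) (hlt : k < pvPrefixCount p l) : p l[k] = true := by
  induction l generalizing k with
  | nil => simp at hk
  | cons x xs ih =>
    rcases Bool.eq_false_or_eq_true (p x) with hpx | hpx
    · rw [pvPrefixCount_cons_true p x xs hpx] at hlt
      cases k with
      | zero => simpa using hpx
      | succ k' => simpa using ih k' (by simpa using hk) (by omega)
    · rw [pvPrefixCount_cons_false p x xs hpx] at hlt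
      exact absurd hlt (by omega)

theorem pvPrefixCount_getElem_false (p : String → Bool) (l : List String)
    (h : pvPrefixCount p l < l.length) : p (l[pvPrefixCount p l]) = false := by
  induction l with
  | nil => simp at h
  | cons x xs ih =>
    rcases Bool.eq_false_or_eq_true (p x) with hpx | hpx
    · simp only [pvPrefixCount_cons_true p x xs hpx] at h ⊢
      simpa using ih (by simpa using h)
    · simp only [pvPrefixCount_cons_false p x xs hpx]
      simpa using hpx

-- Pairwise (≤) gives getElem-monotonicity for p ≤ q
theorem pairwise_le_getElem_mono (l : List String) (h : List.Pairwise (· ≤ ·) l)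
    {p q : Nat} (hpq : p ≤ q) (hq : q < l.length) : l[p]'(by omega) ≤ l[q] := by
  rcases Nat.lt_or_ge p q with hlt | hge
  · exact (List.pairwise_iff_getElem.mp h) p q (by omega) hq hlt
  · have : p = q := by omega
    subst this; exact le_refl _

-- elementwise content of a matched window
theorem window_getElem (w r : List String) (j k : Nat) (hk : k < r.length)
    (hjm : j + r.length ≤ w.length)
    (heq : (w.drop j).take r.length = r) : w[j + k]'(by omega) = r[k] := by
  have h1 : ((w.drop j).take r.length)[k]'(by simp [List.length_take, List.length_drop]; omega) = r[k] := by
    simp only [heq]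
  simpa [List.getElem_take, List.getElem_drop] using h1

-- a window matching a nonempty r fits inside w
theorem window_len (w r : List String) (j : Nat) (hm : 1 ≤ r.length)
    (heq : (w.drop j).take r.length = r) : j + r.length ≤ w.length := by
  have := congrArg List.length heq
  simp [List.length_take, List.length_drop] at this
  omega

-- The core combinatorial fact: on sorted lists the naive scan succeeds iff the
-- single candidate position le - run matches.
theorem core_iff (w r : List String) (hw : List.Pairwise (· ≤ ·) w)
    (hr : List.Pairwise (· ≤ ·) r) (f : String) (t : List String) (hrft : r = f :: t) :
    ((∃ j : Nat, j + r.length ≤ w.length ∧ (w.drop j).take r.length = r) ↔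
      (pvPrefixCount (fun x => x == f) r ≤ pvPrefixCount (fun x => decide (x ≤ f)) w ∧
        (w.drop (pvPrefixCount (fun x => decide (x ≤ f)) w - pvPrefixCount (fun x => x == f) r)).take r.length = r)) := by
  have hm1 : 1 ≤ r.length := by rw [hrft]; simp
  have hrunm : pvPrefixCount (fun x => x == f) r ≤ r.length := pvPrefixCount_le_length _ _
  have hlen : pvPrefixCount (fun x => decide (x ≤ f)) w ≤ w.length := pvPrefixCount_le_length _ _
  have hrun1 : 1 ≤ pvPrefixCount (fun x => x == f) r := by
    rw [hrft, pvPrefixCount_cons_true _ _ _ (by simp)]; omega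
  have hr0 : r[0]'(by omega) = f := by simp [hrft]
  -- W1 : k < le → w[k] ≤ f
  have W1 : ∀ k (hk : k < w.length), k < pvPrefixCount (fun x => decide (x ≤ f)) w →
      w[k]'(by omega) ≤ f := by
    intro k hk hkle
    have h1 := pvPrefixCount_getElem_true (fun x => decide (x ≤ f)) w k (by omega) (by omega)
    exact of_decide_eq_true h1
  -- W2 : le ≤ k → f < w[k]
  have W2 : ∀ k (hk : k < w.length), pvPrefixCount (fun x => decide (x ≤ f)) w ≤ k →
      f < w[k]'(by omega) := by
    intro k hk hkle
    have hfalse := pvPrefixCount_getElem_false (fun x => decide (x ≤ f)) w (by omega)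
    have hnot : ¬ (w[pvPrefixCount (fun x => decide (x ≤ f)) w]'(by omega) ≤ f) :=
      of_decide_eq_false hfalse
    have hmono : w[pvPrefixCount (fun x => decide (x ≤ f)) w]'(by omega) ≤ w[k]'(by omega) :=
      pairwise_le_getElem_mono w hw hkle (by omega)
    exact lt_of_lt_of_le (lt_of_not_ge hnot) hmono
  -- R1 : k < run → r[k] = f
  have R1 : ∀ k (hk : k < r.length), k < pvPrefixCount (fun x => x == f) r →
      r[k]'(by omega) = f := by
    intro k hk hkr
    have h1 := pvPrefixCount_getElem_true (fun x => x == f) r k (by omega) (by omega)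
    exact eq_of_beq h1
  -- R2 : run < m → f < r[run]
  have R2 : ∀ (hrm : pvPrefixCount (fun x => x == f) r < r.length),
      f < r[pvPrefixCount (fun x => x == f) r]'(hrm) := by
    intro hrm
    have hfalse := pvPrefixCount_getElem_false (fun x => x == f) r (by omega)
    have hne : r[pvPrefixCount (fun x => x == f) r]'(by omega) ≠ f := ne_of_beq_false hfalse
    have hmono : r[0]'(by omega) ≤ r[pvPrefixCount (fun x => x == f) r]'(by omega) :=
      pairwise_le_getElem_mono r hr (by omega) (by omega)
    rw [hr0] at hmono
    exact lt_of_le_of_ne hmono (fun h => hne h.symm)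
  -- now abbreviate: every fact above is stated through the two counts
  generalize hrun : pvPrefixCount (fun x => x == f) r = run at *
  generalize hle : pvPrefixCount (fun x => decide (x ≤ f)) w = le at *
  constructor
  · rintro ⟨j, hjm, heq⟩
    have E : ∀ k (hk : k < r.length), w[j + k]'(by omega) = r[k]'(by omega) := by
      intro k hk
      exact window_getElem w r j k (by omega) (by omega) heq
    -- j + run ≤ le
    have hjle : j + run ≤ le := by
      by_contra hcon
      have hk : j + (run - 1) < w.length := by omega
      have hval : w[j + (run - 1)]'hk = f := by
        rw [E (run - 1) (by omega)]
        exact R1 (run - 1) (by omega) (by omega)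
      have := W2 (j + (run - 1)) hk (by omega)
      rw [hval] at this; exact lt_irrefl f this
    refine ⟨by omega, ?_⟩
    rcases Nat.lt_or_ge run r.length with hrm | hrm
    · -- run < r.length : le = j + run, the candidate is exactly j
      have hjrn : j + run < w.length := by omega
      have hgt : f < w[j + run]'hjrn := by
        rw [E run (by omega)]; exact R2 hrm
      have hlej : le ≤ j + run := by
        by_contra hcon
        have := W1 (j + run) hjrn (by omega)
        exact absurd hgt (not_lt_of_ge this)
      have hlr : le - run = j := by omega
      rw [hlr]; exact heq
    · -- run = r.length : r is constantly f; the window at le - run is all f as well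
      apply List.ext_getElem
      · simp [List.length_take, List.length_drop]; omega
      · intro k hk1 hk2
        have hkm : k < r.length := by omega
        have hidx : le - run + k < w.length := by omega
        have hval : w[le - run + k]'(by omega) = f := by
          have hub : w[le - run + k]'(by omega) ≤ f := W1 _ hidx (by omega)
          have hlb : f ≤ w[le - run + k]'(by omega) := by
            have hwj : w[j + 0]'(by omega) = f := by
              rw [E 0 (by omega)]; exact hr0
            calc f = w[j + 0]'(by omega) := hwj.symm
              _ ≤ w[le - run + k]'(by omega) := pairwise_le_getElem_mono w hw (by omega) (by omega)
          exact le_antisymm hub hlb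
        simp only [List.getElem_take, List.getElem_drop]
        rw [hval]
        exact (R1 k hkm (by omega)).symm
  · rintro ⟨hrle, heq⟩
    exact ⟨le - run, window_len w r (le - run) (by omega) heq, heq⟩

-- Bool-level bridge between the two port bodies, assuming both lists sorted
theorem bridge (w r : List String) (hw : List.Pairwise (· ≤ ·) w)
    (hr : List.Pairwise (· ≤ ·) r) :
    (if (r.length : Int) = 0 then true
     else if (r.length : Int) > (w.length : Int) then false
     else (PySem.List.pyRange 0 ((w.length : Int) - (r.length : Int) + 1) 1).any
       (fun i => PySem.List.slice w (some i) (some (i + (r.length : Int))) == r))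
    = (if r.length = 0 then true
       else
         decide (0 ≤ ((pvPrefixCount (fun x => decide (x ≤ r.headI)) w : Int) - (pvPrefixCount (fun x => x == r.headI) r : Int))) &&
         (PySem.List.slice w
            (some ((pvPrefixCount (fun x => decide (x ≤ r.headI)) w : Int) - (pvPrefixCount (fun x => x == r.headI) r : Int)))
            (some (((pvPrefixCount (fun x => decide (x ≤ r.headI)) w : Int) - (pvPrefixCount (fun x => x == r.headI) r : Int)) + (r.length : Int))) == r)) := by
  cases r with
  | nil => simp
  | cons f t =>
    set r := f :: t with hrdef
    set m := r.length with hmdef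
    set n := w.length with hndef
    set run := pvPrefixCount (fun x => x == r.headI) r with hrundef
    set le := pvPrefixCount (fun x => decide (x ≤ r.headI)) w with hledef
    have hm1 : 1 ≤ m := by rw [hmdef, hrdef]; simp
    have hm0 : ¬ ((m : Int) = 0) := by omega
    have hm0' : ¬ (m = 0) := by omega
    rw [if_neg hm0, if_neg hm0']
    -- convert B's boolean to a Prop once and for all
    have hRHS : ((decide (0 ≤ ((le : Int) - (run : Int))) &&
        (PySem.List.slice w (some ((le : Int) - (run : Int)))
          (some (((le : Int) - (run : Int)) + (m : Int))) == r)) = true) ↔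
        (run ≤ le ∧ (w.drop (le - run)).take m = r) := by
      rw [Bool.and_eq_true]
      constructor
      · rintro ⟨h0b, hsb⟩
        have h0 : (0 : Int) ≤ (le : Int) - (run : Int) := of_decide_eq_true h0b
        have hs := eq_of_beq hsb
        rw [PySem.List.slice_toNat w (by omega) (by omega)] at hs
        have h1 : (((le : Int) - (run : Int)) + (m : Int)).toNat - ((le : Int) - (run : Int)).toNat = m := by omega
        have h2 : ((le : Int) - (run : Int)).toNat = le - run := by omega
        rw [h1, h2] at hs
        exact ⟨by omega, hs⟩
      · rintro ⟨h0, hs⟩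
        refine ⟨decide_eq_true (by omega), beq_iff_eq.mpr ?_⟩
        rw [PySem.List.slice_toNat w (by omega) (by omega)]
        have h1 : (((le : Int) - (run : Int)) + (m : Int)).toNat - ((le : Int) - (run : Int)).toNat = m := by omega
        have h2 : ((le : Int) - (run : Int)).toNat = le - run := by omega
        rw [h1, h2]
        exact hs
    by_cases hmn : (m : Int) > (n : Int)
    · rw [if_pos hmn]
      have hno : ¬ (run ≤ le ∧ (w.drop (le - run)).take m = r) := by
        rintro ⟨_, hwnd⟩
        have := window_len w r (le - run) (by rw [hrdef]; simp) hwnd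
        omega
      rcases Bool.eq_false_or_eq_true (decide (0 ≤ ((le : Int) - (run : Int))) &&
          (PySem.List.slice w (some ((le : Int) - (run : Int)))
            (some (((le : Int) - (run : Int)) + (m : Int))) == r)) with hb | hb
      · exact absurd (hRHS.mp hb) hno
      · rw [hb]
    · rw [if_neg hmn]
      have hmn' : m ≤ n := by omega
      have hLHS : ((PySem.List.pyRange 0 ((n : Int) - (m : Int) + 1) 1).any
          (fun i => PySem.List.slice w (some i) (some (i + (m : Int))) == r) = true) ↔
          (∃ j : Nat, j + m ≤ n ∧ (w.drop j).take m = r) := by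
        rw [List.any_eq_true]
        constructor
        · rintro ⟨i, hmem, hbeq⟩
          rw [PySem.List.mem_pyRange_one] at hmem
          obtain ⟨h0, hub⟩ := hmem
          have hbe := eq_of_beq hbeq
          rw [PySem.List.slice_toNat w h0 (by omega)] at hbe
          have h1 : (i + (m : Int)).toNat - i.toNat = m := by omega
          rw [h1] at hbe
          exact ⟨i.toNat, window_len w r i.toNat (by rw [hrdef]; simp) hbe, hbe⟩
        · rintro ⟨j, hjm, heq⟩
          refine ⟨(j : Int), ?_, ?_⟩
          · rw [PySem.List.mem_pyRange_one]
            constructor <;> omega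
          · apply beq_iff_eq.mpr
            rw [PySem.List.slice_toNat w (by omega) (by omega)]
            have h1 : ((j : Int) + (m : Int)).toNat - (j : Int).toNat = m := by omega
            have h2 : (j : Int).toNat = j := by omega
            rw [h1, h2]
            exact heq
      rw [Bool.eq_iff_iff, hLHS, hRHS]
      exact core_iff w r hw hr f t hrdef

-- ===== VERDICT (by name: the statement is the Claim_ definition above) =====
theorem is_sublist_spec : Claim_equal_is_sublist := by
  intro words response _
  unfold Spec_is_sublist is_sublist is_sublist_alt
  simp only []
  exact bridge (PySem.List.sorted words (fun s => s) false)
    (PySem.List.sorted response (fun s => s) false)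
    (PySem.List.sorted_pairwise words (fun s => s))
    (PySem.List.sorted_pairwise response (fun s => s))
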